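-- pv_equiv track=rewrite | github.com/braineniac/adapt_kalman | scripts/simulator.py | get_zero_section_indexes
-- ===== SOURCE A (Python) =====
-- def get_zero_section_indexes(array=None):
--     if not array:
--         raise ValueError
--     else:
--         last_x = 1
--         pair = []
--         pairs = []
--         for i in range(len(array)-1):
--             if array[i] == 0 and last_x != 0:
--                 pair.append(i)
--             elif array[i] != 0 and last_x == 0:
--                 pair.append(i)
--             if len(pair) == 2:
--                 tuple_pair = (pair[0], pair[1])
--                 pairs.append(tuple_pair)
--                 pair.remove(pair[0])
--                 pair.remove(pair[0])
--             last_x = array[i]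
--         return pairs
-- ===== SOURCE B (Python) =====
-- def _pair_up(ts):
--     if len(ts) >= 2:
--         return [(ts[0], ts[1])] + _pair_up(ts[2:])
--     return []
--
--
-- def get_zero_section_indexes(array=None):
--     if not array:
--         raise ValueError
--     ts = []
--     prev_zero = False
--     for i in range(len(array) - 1):
--         cur_zero = (array[i] == 0)
--         if cur_zero != prev_zero:
--             ts.append(i)
--         prev_zero = cur_zero
--     return _pair_up(ts)
-- ===== Notes on version B (the rewrite author's own statement) =====
-- stated objective: alternative
-- what changed: Replaces A's buffered single pass (a pair buffer flushed and emptied inside the loop) by two separately shaped phases: collect all zero/nonzero transition indices in one boolean-state scan, then pair consecutive transitions into tuples in a second pass, dropping an odd trailing transition as A does.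
import Mathlib
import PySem

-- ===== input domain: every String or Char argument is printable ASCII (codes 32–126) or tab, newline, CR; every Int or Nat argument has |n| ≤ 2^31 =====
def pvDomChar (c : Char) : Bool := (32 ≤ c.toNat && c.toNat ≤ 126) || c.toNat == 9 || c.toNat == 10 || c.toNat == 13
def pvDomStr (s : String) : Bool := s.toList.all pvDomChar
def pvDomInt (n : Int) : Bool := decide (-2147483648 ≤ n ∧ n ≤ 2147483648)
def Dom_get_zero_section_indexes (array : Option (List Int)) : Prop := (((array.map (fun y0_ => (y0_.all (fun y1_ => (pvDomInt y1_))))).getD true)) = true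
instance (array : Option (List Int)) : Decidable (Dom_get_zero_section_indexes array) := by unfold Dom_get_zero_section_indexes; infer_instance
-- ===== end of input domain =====

-- B replaces A's buffered one-pass loop by two phases (collect transition indices, then pair them); same O(n) cost, different decomposition. A raises ValueError on None/empty input; Pre_ excludes exactly those.


-- ===== PORT A =====
-- one loop step of A: maybe append i to the pair buffer, flush when it holds two
def stepA (xs : List Int) (s : Int × List Int × List (Int × Int)) (i : Nat) : Int × List Int × List (Int × Int) :=
  let last_x := s.1
  let pair :=
    if xs[i]?.getD 0 = 0 ∧ last_x ≠ 0 then s.2.1 ++ [(i : Int)]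
    else if xs[i]?.getD 0 ≠ 0 ∧ last_x = 0 then s.2.1 ++ [(i : Int)]
    else s.2.1
  if pair.length = 2 then (xs[i]?.getD 0, [], s.2.2 ++ [(pair.getD 0 0, pair.getD 1 0)])
  else (xs[i]?.getD 0, pair, s.2.2)

def get_zero_section_indexes (array : Option (List Int)) : List (Int × Int) :=
  match array with
  | none => []            -- Python raises ValueError here; excluded by Pre_
  | some xs =>
    if xs.isEmpty then [] -- Python raises ValueError here; excluded by Pre_
    else ((List.range (xs.length - 1)).foldl (stepA xs) (1, [], [])).2.2

-- ===== PORT B =====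
-- one loop step of B: record i whenever the zero/nonzero state flips
def stepB (xs : List Int) (s : Bool × List Int) (i : Nat) : Bool × List Int :=
  let cur := decide (xs[i]?.getD 0 = 0)
  (cur, if cur ≠ s.1 then s.2 ++ [(i : Int)] else s.2)

-- port of Source B's _pair_up
def pairUp : List Int → List (Int × Int)
  | a :: b :: r => (a, b) :: pairUp r
  | _ => []

def get_zero_section_indexes_alt (array : Option (List Int)) : List (Int × Int) :=
  match array with
  | none => []            -- Python raises ValueError here; excluded by Pre_
  | some xs =>
    if xs.isEmpty then [] -- Python raises ValueError here; excluded by Pre_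
    else pairUp ((List.range (xs.length - 1)).foldl (stepB xs) (false, [])).2

-- ===== PRECONDITION & SPEC =====
-- Pre_ excludes exactly the inputs on which A raises ValueError: None and the empty list.
def Pre_get_zero_section_indexes (array : Option (List Int)) : Prop := array.getD [] ≠ []
instance (array : Option (List Int)) : Decidable (Pre_get_zero_section_indexes array) := by unfold Pre_get_zero_section_indexes; infer_instance
def pvWitness_get_zero_section_indexes : Option (List Int) := some [1, 0, 0, 1, 2]

def Spec_get_zero_section_indexes (array : Option (List Int)) (out : List (Int × Int)) : Prop := out = get_zero_section_indexes_alt array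
instance (array : Option (List Int)) (out : List (Int × Int)) : Decidable (Spec_get_zero_section_indexes array out) := by unfold Spec_get_zero_section_indexes; infer_instance

-- ===== CLAIM (what is proved, stated in full; the proofs are below) =====
def Claim_equal_get_zero_section_indexes : Prop := ∀ (array : Option (List Int)), Dom_get_zero_section_indexes array → Pre_get_zero_section_indexes array → Spec_get_zero_section_indexes array (get_zero_section_indexes array)

-- ===== LEMMAS AND PROOFS =====

-- the (≤1-element) tail of ts left over after pairUp pairs it off two by two
def oddTail : List Int → List Int
  | _ :: _ :: r => oddTail r
  | l => l

theorem oddTail_cases (ts : List Int) : oddTail ts = [] ∨ ∃ t, oddTail ts = [t] := by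
  induction ts using oddTail.induct with
  | case1 a b r ih => simpa [oddTail] using ih
  | case2 l h => match l, h with
    | [], _ => exact Or.inl rfl
    | [a], _ => exact Or.inr ⟨a, rfl⟩
    | a :: b :: r, h => exact absurd rfl (h a b r)

theorem append_even (ts : List Int) (i : Int) (h : oddTail ts = []) :
    pairUp (ts ++ [i]) = pairUp ts ∧ oddTail (ts ++ [i]) = [i] := by
  induction ts using oddTail.induct with
  | case1 a b r ih => simpa [oddTail, pairUp] using ih (by simpa [oddTail] using h)
  | case2 l hl => match l, hl with
    | [], _ => simp [oddTail, pairUp]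
    | [a], _ => simp [oddTail] at h
    | a :: b :: r, hl => exact absurd rfl (hl a b r)

theorem append_odd (ts : List Int) (t i : Int) (h : oddTail ts = [t]) :
    pairUp (ts ++ [i]) = pairUp ts ++ [(t, i)] ∧ oddTail (ts ++ [i]) = [] := by
  induction ts using oddTail.induct with
  | case1 a b r ih => simpa [oddTail, pairUp] using ih (by simpa [oddTail] using h)
  | case2 l hl => match l, hl with
    | [], _ => simp [oddTail] at h
    | [a], _ =>
      simp [oddTail] at h
      subst h
      simp [oddTail, pairUp]
    | a :: b :: r, hl => exact absurd rfl (hl a b r)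

-- the loop invariant: A's state is (last_x, oddTail ts, P ++ pairUp ts) whenever
-- B's state is (decide (last_x = 0), ts)
theorem loop_inv (xs : List Int) :
    ∀ (l : List Nat) (last_x : Int) (ts : List Int) (P : List (Int × Int)),
      (l.foldl (stepA xs) (last_x, oddTail ts, P ++ pairUp ts)).2.2
        = P ++ pairUp (l.foldl (stepB xs) (decide (last_x = 0), ts)).2 := by
  intro l
  induction l with
  | nil => intro last_x ts P; simp
  | cons i l ih =>
    intro last_x ts P
    rw [List.foldl_cons, List.foldl_cons]
    by_cases hx : xs[i]?.getD 0 = 0 <;> by_cases hl : last_x = 0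
    · -- both zero: no transition
      have hA : stepA xs (last_x, oddTail ts, P ++ pairUp ts) i
          = (xs[i]?.getD 0, oddTail ts, P ++ pairUp ts) := by
        rcases oddTail_cases ts with h | ⟨t, h⟩ <;> simp [stepA, hx, hl, h]
      have hB : stepB xs (decide (last_x = 0), ts) i = (decide (xs[i]?.getD 0 = 0), ts) := by
        simp [stepB, hx, hl]
      rw [hA, hB]; exact ih _ ts P
    · -- transition to zero
      rcases oddTail_cases ts with h | ⟨t, h⟩
      · have hA : stepA xs (last_x, oddTail ts, P ++ pairUp ts) i
            = (xs[i]?.getD 0, oddTail (ts ++ [(i : Int)]), P ++ pairUp (ts ++ [(i : Int)])) := by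
          simp [stepA, hx, hl, h, (append_even ts (i : Int) h).1, (append_even ts (i : Int) h).2]
        have hB : stepB xs (decide (last_x = 0), ts) i
            = (decide (xs[i]?.getD 0 = 0), ts ++ [(i : Int)]) := by simp [stepB, hx, hl]
        rw [hA, hB]; exact ih _ (ts ++ [(i : Int)]) P
      · have hA : stepA xs (last_x, oddTail ts, P ++ pairUp ts) i
            = (xs[i]?.getD 0, oddTail (ts ++ [(i : Int)]), P ++ pairUp (ts ++ [(i : Int)])) := by
          simp [stepA, hx, hl, h, (append_odd ts t (i : Int) h).1, (append_odd ts t (i : Int) h).2]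
        have hB : stepB xs (decide (last_x = 0), ts) i
            = (decide (xs[i]?.getD 0 = 0), ts ++ [(i : Int)]) := by simp [stepB, hx, hl]
        rw [hA, hB]; exact ih _ (ts ++ [(i : Int)]) P
    · -- transition to nonzero
      rcases oddTail_cases ts with h | ⟨t, h⟩
      · have hA : stepA xs (last_x, oddTail ts, P ++ pairUp ts) i
            = (xs[i]?.getD 0, oddTail (ts ++ [(i : Int)]), P ++ pairUp (ts ++ [(i : Int)])) := by
          simp [stepA, hx, hl, h, (append_even ts (i : Int) h).1, (append_even ts (i : Int) h).2]
        have hB : stepB xs (decide (last_x = 0), ts) i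
            = (decide (xs[i]?.getD 0 = 0), ts ++ [(i : Int)]) := by simp [stepB, hx, hl]
        rw [hA, hB]; exact ih _ (ts ++ [(i : Int)]) P
      · have hA : stepA xs (last_x, oddTail ts, P ++ pairUp ts) i
            = (xs[i]?.getD 0, oddTail (ts ++ [(i : Int)]), P ++ pairUp (ts ++ [(i : Int)])) := by
          simp [stepA, hx, hl, h, (append_odd ts t (i : Int) h).1, (append_odd ts t (i : Int) h).2]
        have hB : stepB xs (decide (last_x = 0), ts) i
            = (decide (xs[i]?.getD 0 = 0), ts ++ [(i : Int)]) := by simp [stepB, hx, hl]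
        rw [hA, hB]; exact ih _ (ts ++ [(i : Int)]) P
    · -- both nonzero: no transition
      have hA : stepA xs (last_x, oddTail ts, P ++ pairUp ts) i
          = (xs[i]?.getD 0, oddTail ts, P ++ pairUp ts) := by
        rcases oddTail_cases ts with h | ⟨t, h⟩ <;> simp [stepA, hx, hl, h]
      have hB : stepB xs (decide (last_x = 0), ts) i = (decide (xs[i]?.getD 0 = 0), ts) := by
        simp [stepB, hx, hl]
      rw [hA, hB]; exact ih _ ts P

-- ===== VERDICT (by name: the statement is the Claim_ definition above) =====
theorem get_zero_section_indexes_spec : Claim_equal_get_zero_section_indexes := by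
  intro array _ _
  unfold Spec_get_zero_section_indexes get_zero_section_indexes get_zero_section_indexes_alt
  match array with
  | none => rfl
  | some xs =>
    by_cases h : xs.isEmpty <;> simp only [h, if_true]
    have := loop_inv xs (List.range (xs.length - 1)) 1 [] []
    simpa [oddTail, pairUp] using this
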